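-- pv_equiv track=rewrite | github.com/StevenXoFk/Tarea-taller-Tkinter | convertidor.py | base7_a_base11
-- ===== SOURCE A (Python) =====
-- def base7_a_base11(numero):
--     res = 0
--     exponentee = 0
--     base11 = ""
--
--
--     diles = "0123456789ABCDEF"
--
--     while numero > 0:
--         nuevo = numero % 10
--         res += nuevo * (7 ** exponentee)
--         numero //= 10
--         exponentee += 1
--
--     while res > 0:
--         todo = res % 11
--         base11 = diles[todo] + base11
--         res //= 11
--
--     return base11
-- ===== SOURCE B (Python) =====
-- def base7_a_base11(numero):
--     def decimal_digits(n):
--         # decimal digits of n, most significant first ([] for n <= 0)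
--         return decimal_digits(n // 10) + [n % 10] if n > 0 else []
--
--     res = 0
--     for d in decimal_digits(numero):
--         res = res * 7 + d
--
--     out = []
--     while res > 0:
--         out.append("0123456789ABCDEF"[res % 11])
--         res //= 11
--     return "".join(reversed(out))
-- ===== Notes on version B (the rewrite author's own statement) =====
-- stated objective: alternative
-- what changed: Phase 1's LSB-first modulo loop with an explicit exponent and power-sum is replaced by a recursive MSB-first digit list folded with Horner's rule (no exponent variable), and the base-11 string is built by appending digits and reversing instead of repeated prepending.
import Mathlib
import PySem

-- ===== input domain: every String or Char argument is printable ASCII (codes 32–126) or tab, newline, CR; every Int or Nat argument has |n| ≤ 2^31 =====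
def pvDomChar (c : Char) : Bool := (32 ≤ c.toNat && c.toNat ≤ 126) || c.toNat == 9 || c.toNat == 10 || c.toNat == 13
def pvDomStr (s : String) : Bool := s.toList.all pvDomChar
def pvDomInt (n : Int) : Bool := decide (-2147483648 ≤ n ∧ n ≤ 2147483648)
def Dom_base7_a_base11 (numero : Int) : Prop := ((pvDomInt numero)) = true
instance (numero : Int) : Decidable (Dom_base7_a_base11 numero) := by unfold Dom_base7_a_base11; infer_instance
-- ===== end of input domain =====

-- B replaces A's LSB-first modulo/power-sum loop by an MSB-first digit list folded with
-- Horner's rule, and builds the base-11 string by appending then reversing (alternative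
-- decomposition, same cost on the bounded domain).

-- termination helpers (cited by name in decreasing_by)
theorem pv_fdiv10_lt (n : Int) (h : 0 < n) :
    (PySem.Int.floordiv n 10).toNat < n.toNat := by
  rw [PySem.Int.floordiv_eq_ediv_of_pos (by norm_num)]; omega

theorem pv_fdiv11_lt (n : Int) (h : 0 < n) :
    (PySem.Int.floordiv n 11).toNat < n.toNat := by
  rw [PySem.Int.floordiv_eq_ediv_of_pos (by norm_num)]; omega

-- ===== PORT A =====
def pvDiles : List Char := "0123456789ABCDEF".toList

-- first while loop: exponentee starts at 0 and only increments, so 7 ** exponentee is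
-- ported as 7 ^ exponentee.toNat
def pvALoop1 (numero res exponentee : Int) : Int :=
  if numero > 0 then
    pvALoop1 (PySem.Int.floordiv numero 10)
      (res + PySem.Int.mod numero 10 * 7 ^ exponentee.toNat) (exponentee + 1)
  else res
termination_by numero.toNat
decreasing_by exact pv_fdiv10_lt _ (by omega)

-- second while loop; diles[todo]: 0 ≤ res % 11 < 11 ≤ 16 so the index is always in
-- range and pyGetD's default is never taken
def pvALoop2 (res : Int) (base11 : List Char) : List Char :=
  if res > 0 then
    pvALoop2 (PySem.Int.floordiv res 11)
      (PySem.List.pyGetD pvDiles (PySem.Int.mod res 11) ' ' :: base11)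
  else base11
termination_by res.toNat
decreasing_by exact pv_fdiv11_lt _ (by omega)

def base7_a_base11 (numero : Int) : String :=
  String.ofList (pvALoop2 (pvALoop1 numero 0 0) [])

-- ===== PORT B =====
-- decimal digits of n, most significant first ([] for n ≤ 0)
def pvBDigits (n : Int) : List Int :=
  if n > 0 then pvBDigits (PySem.Int.floordiv n 10) ++ [PySem.Int.mod n 10] else []
termination_by n.toNat
decreasing_by exact pv_fdiv10_lt _ (by omega)

-- the while loop appending base-11 digit characters
def pvBLoop2 (res : Int) (out : List Char) : List Char :=
  if res > 0 then
    pvBLoop2 (PySem.Int.floordiv res 11)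
      (out ++ [PySem.List.pyGetD pvDiles (PySem.Int.mod res 11) ' '])
  else out
termination_by res.toNat
decreasing_by exact pv_fdiv11_lt _ (by omega)

def base7_a_base11_alt (numero : Int) : String :=
  let res := (pvBDigits numero).foldl (fun r d => r * 7 + d) 0
  String.ofList (pvBLoop2 res []).reverse

-- ===== PRECONDITION & SPEC =====
def Spec_base7_a_base11 (numero : Int) (out : String) : Prop := out = base7_a_base11_alt numero
instance (numero : Int) (out : String) : Decidable (Spec_base7_a_base11 numero out) := by unfold Spec_base7_a_base11; infer_instance

-- ===== CLAIM (what is proved, stated in full; the proofs are below) =====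
def Claim_equal_base7_a_base11 : Prop := ∀ (numero : Int), Dom_base7_a_base11 numero → Spec_base7_a_base11 numero (base7_a_base11 numero)

-- ===== LEMMAS AND PROOFS =====

-- Horner fold with a general seed
theorem pv_horner_seed (ds : List Int) (a : Int) :
    ds.foldl (fun r d => r * 7 + d) a
      = a * 7 ^ ds.length + ds.foldl (fun r d => r * 7 + d) 0 := by
  induction ds generalizing a with
  | nil => simp
  | cons d ds ih =>
    simp only [List.foldl_cons, List.length_cons]
    rw [ih (a * 7 + d), ih (0 * 7 + d)]
    ring

-- A's first loop computes Horner's value of B's digit list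
theorem pv_loop1_eq (n : Int) : ∀ res e : Int, 0 ≤ e →
    pvALoop1 n res e
      = res + (pvBDigits n).foldl (fun r d => r * 7 + d) 0 * 7 ^ e.toNat := by
  induction n using (fun motive ih n => Nat.strongRecOn (motive := fun k => ∀ n : Int, n.toNat = k → motive n)
      n.toNat (fun k ihk n hn => ih n (fun m hm => ihk m.toNat (hn ▸ hm) m rfl)) n rfl :
      ∀ motive : Int → Prop, (∀ n : Int, (∀ m : Int, m.toNat < n.toNat → motive m) → motive n) → ∀ n, motive n) with
  | _ n ih =>
    intro res e he
    by_cases h : n > 0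
    · rw [pvALoop1, if_pos h, pvBDigits, if_pos h,
        ih _ (pv_fdiv10_lt n h) _ _ (by omega)]
      rw [List.foldl_append]
      simp only [List.foldl_cons, List.foldl_nil]
      rw [pv_horner_seed]
      have : (e + 1).toNat = e.toNat + 1 := by omega
      rw [this]
      ring
    · rw [pvALoop1, if_neg h, pvBDigits, if_neg h]
      simp

-- B's output loop with any accumulator
theorem pv_bloop2_append (res : Int) : ∀ l : List Char,
    pvBLoop2 res l = l ++ pvBLoop2 res [] := by
  induction res using (fun motive ih n => Nat.strongRecOn (motive := fun k => ∀ n : Int, n.toNat = k → motive n)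
      n.toNat (fun k ihk n hn => ih n (fun m hm => ihk m.toNat (hn ▸ hm) m rfl)) n rfl :
      ∀ motive : Int → Prop, (∀ n : Int, (∀ m : Int, m.toNat < n.toNat → motive m) → motive n) → ∀ n, motive n) with
  | _ res ih =>
    intro l
    by_cases h : res > 0
    · conv_lhs => rw [pvBLoop2]
      conv_rhs => rw [pvBLoop2]
      rw [if_pos h, if_pos h, ih _ (pv_fdiv11_lt res h)]
      nth_rewrite 2 [ih _ (pv_fdiv11_lt res h)]
      simp
    · rw [pvBLoop2, if_neg h, pvBLoop2, if_neg h]; simp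

-- A's second loop is the reverse of B's
theorem pv_loop2_eq (res : Int) : ∀ acc : List Char,
    pvALoop2 res acc = (pvBLoop2 res []).reverse ++ acc := by
  induction res using (fun motive ih n => Nat.strongRecOn (motive := fun k => ∀ n : Int, n.toNat = k → motive n)
      n.toNat (fun k ihk n hn => ih n (fun m hm => ihk m.toNat (hn ▸ hm) m rfl)) n rfl :
      ∀ motive : Int → Prop, (∀ n : Int, (∀ m : Int, m.toNat < n.toNat → motive m) → motive n) → ∀ n, motive n) with
  | _ res ih =>
    intro acc
    by_cases h : res > 0
    · conv_lhs => rw [pvALoop2]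
      conv_rhs => rw [pvBLoop2]
      rw [if_pos h, if_pos h, ih _ (pv_fdiv11_lt res h)]
      nth_rewrite 2 [pv_bloop2_append (PySem.Int.floordiv res 11)]
      simp
    · rw [pvALoop2, if_neg h, pvBLoop2, if_neg h]; simp

-- ===== VERDICT (by name: the statement is the Claim_ definition above) =====
theorem base7_a_base11_spec : Claim_equal_base7_a_base11 := by
  intro numero _
  unfold Spec_base7_a_base11 base7_a_base11 base7_a_base11_alt
  rw [pv_loop1_eq numero 0 0 le_rfl, pv_loop2_eq]
  simp
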